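-- pv_equiv track=rewrite | github.com/mattwillms/loambase | app/tasks/enrich_plants.py | _expand_zone_range
-- ===== SOURCE A (Python) =====
-- from typing import Any, Optional
--
-- SUBZONES = ["a", "b"]
--
-- def _expand_zone_range(
--     start_num: int, start_sub: Optional[str],
--     end_num: int, end_sub: Optional[str],
-- ) -> list[str]:
--     has_subzones = start_sub is not None or end_sub is not None
--     if not has_subzones:
--         return [str(z) for z in range(start_num, end_num + 1)]
--     # Normalize: bare start = 'a', bare end = 'b'
--     start_sub = start_sub or "a"
--     end_sub = end_sub or "b"
--     result: list[str] = []
--     for z in range(start_num, end_num + 1):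
--         for sub in SUBZONES:
--             if z == start_num and sub < start_sub:
--                 continue
--             if z == end_num and sub > end_sub:
--                 continue
--             result.append(f"{z}{sub}")
--     return result
-- ===== SOURCE B (Python) =====
-- SUBZONES = ["a", "b"]
--
-- def _expand_zone_range(start_num, start_sub, end_num, end_sub):
--     if start_sub is None and end_sub is None:
--         return [str(z) for z in range(start_num, end_num + 1)]
--     start_sub = start_sub or "a"
--     end_sub = end_sub or "b"
--     full = [f"{z}{s}" for z in range(start_num, end_num + 1) for s in SUBZONES]
--     lead = sum(1 for s in SUBZONES if s < start_sub)
--     trail = sum(1 for s in SUBZONES if s > end_sub)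
--     return full[lead:len(full) - trail]
-- ===== Notes on version B (the rewrite author's own statement) =====
-- stated objective: alternative
-- what changed: Instead of A's per-iteration continue guards inside a nested loop, B builds the full zone-by-subzone grid in one comprehension and trims the boundary subzones positionally with a single slice computed from two subzone counts.
import Mathlib
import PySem

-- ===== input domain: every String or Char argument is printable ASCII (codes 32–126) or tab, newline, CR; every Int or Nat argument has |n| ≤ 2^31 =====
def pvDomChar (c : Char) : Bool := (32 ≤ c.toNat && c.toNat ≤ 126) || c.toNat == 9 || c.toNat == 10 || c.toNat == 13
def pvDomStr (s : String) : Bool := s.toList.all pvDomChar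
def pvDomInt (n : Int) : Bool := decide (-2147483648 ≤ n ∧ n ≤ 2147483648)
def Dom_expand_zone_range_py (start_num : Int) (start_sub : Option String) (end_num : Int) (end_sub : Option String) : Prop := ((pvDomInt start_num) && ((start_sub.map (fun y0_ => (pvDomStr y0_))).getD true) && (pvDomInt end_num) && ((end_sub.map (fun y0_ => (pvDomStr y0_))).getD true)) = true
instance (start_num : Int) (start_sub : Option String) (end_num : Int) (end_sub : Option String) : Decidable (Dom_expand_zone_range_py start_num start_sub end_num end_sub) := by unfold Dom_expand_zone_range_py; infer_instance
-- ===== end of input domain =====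

-- B builds the full zone×subzone grid once and trims the boundary subzones positionally
-- with one slice, instead of A's per-iteration continue guards (objective: alternative decomposition).

-- ===== PORT A =====
def expand_zone_range_py (start_num : Int) (start_sub : Option String) (end_num : Int) (end_sub : Option String) : List String :=
  let has_subzones := start_sub.isSome || end_sub.isSome
  if !has_subzones then
    (PySem.List.pyRange start_num (end_num + 1) 1).map (fun z => PySem.Int.toStr z)
  else
    let ss := match start_sub with | none => "a" | some s => if s = "" then "a" else s
    let es := match end_sub with | none => "b" | some s => if s = "" then "b" else s
    (PySem.List.pyRange start_num (end_num + 1) 1).foldl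
      (fun result z =>
        (["a", "b"] : List String).foldl
          (fun result sub =>
            if z = start_num ∧ sub < ss then result
            else if z = end_num ∧ sub > es then result
            else result ++ [PySem.Int.toStr z ++ sub]) result) []

-- ===== PORT B =====
def expand_zone_range_py_alt (start_num : Int) (start_sub : Option String) (end_num : Int) (end_sub : Option String) : List String :=
  if start_sub = none ∧ end_sub = none then
    (PySem.List.pyRange start_num (end_num + 1) 1).map (fun z => PySem.Int.toStr z)
  else
    let ss := match start_sub with | none => "a" | some s => if s = "" then "a" else s
    let es := match end_sub with | none => "b" | some s => if s = "" then "b" else s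
    let full := (PySem.List.pyRange start_num (end_num + 1) 1).flatMap
      (fun z => (["a", "b"] : List String).map (fun s => PySem.Int.toStr z ++ s))
    let lead : Int := ((["a", "b"] : List String).countP (fun s => decide (s < ss)) : Int)
    let trail : Int := ((["a", "b"] : List String).countP (fun s => decide (es < s)) : Int)
    PySem.List.slice full (some lead) (some ((full.length : Int) - trail))

-- ===== PRECONDITION & SPEC =====
def Spec_expand_zone_range_py (start_num : Int) (start_sub : Option String) (end_num : Int) (end_sub : Option String) (out : List String) : Prop := out = expand_zone_range_py_alt start_num start_sub end_num end_sub
instance (start_num : Int) (start_sub : Option String) (end_num : Int) (end_sub : Option String) (out : List String) : Decidable (Spec_expand_zone_range_py start_num start_sub end_num end_sub out) := by unfold Spec_expand_zone_range_py; infer_instance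

-- ===== CLAIM (what is proved, stated in full; the proofs are below) =====
def Claim_equal_expand_zone_range_py : Prop := ∀ (start_num : Int) (start_sub : Option String) (end_num : Int) (end_sub : Option String), Dom_expand_zone_range_py start_num start_sub end_num end_sub → Spec_expand_zone_range_py start_num start_sub end_num end_sub (expand_zone_range_py start_num start_sub end_num end_sub)

-- ===== LEMMAS AND PROOFS =====

-- what A's inner loop appends for one zone z
def pvKept (sn en : Int) (ss es : String) (z : Int) : List String :=
  (if z = sn ∧ "a" < ss then [] else if z = en ∧ es < "a" then [] else [PySem.Int.toStr z ++ "a"]) ++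
  (if z = sn ∧ "b" < ss then [] else if z = en ∧ es < "b" then [] else [PySem.Int.toStr z ++ "b"])

-- one row of B's full grid
def pvRow (z : Int) : List String := [PySem.Int.toStr z ++ "a", PySem.Int.toStr z ++ "b"]

lemma pv_ab : ("a" : String) < "b" := by simp; decide

lemma pv_inner (sn en : Int) (ss es : String) (z : Int) (r : List String) :
    (["a", "b"] : List String).foldl
      (fun result sub =>
        if z = sn ∧ sub < ss then result
        else if z = en ∧ sub > es then result
        else result ++ [PySem.Int.toStr z ++ sub]) r
    = r ++ pvKept sn en ss es z := by
  simp only [List.foldl, pvKept]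
  split_ifs <;> simp

lemma pv_outer (sn en : Int) (ss es : String) (R : List Int) (r : List String) :
    R.foldl
      (fun result z =>
        (["a", "b"] : List String).foldl
          (fun result sub =>
            if z = sn ∧ sub < ss then result
            else if z = en ∧ sub > es then result
            else result ++ [PySem.Int.toStr z ++ sub]) result) r
    = r ++ R.flatMap (pvKept sn en ss es) := by
  induction R generalizing r with
  | nil => simp
  | cons z R ih =>
    rw [List.foldl_cons, pv_inner, ih, List.flatMap_cons, List.append_assoc]

lemma pv_flatMap_congr {α β : Type} (R : List α) (f g : α → List β)
    (h : ∀ z ∈ R, f z = g z) : R.flatMap f = R.flatMap g := by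
  induction R with
  | nil => rfl
  | cons z R ih =>
    rw [List.flatMap_cons, List.flatMap_cons, h z (by simp), ih (fun y hy => h y (by simp [hy]))]

lemma pv_kept_mid (sn en : Int) (ss es : String) (z : Int) (h1 : z ≠ sn) (h2 : z ≠ en) :
    pvKept sn en ss es z = pvRow z := by
  simp [pvKept, pvRow, h1, h2]

lemma pv_lead_le (ss : String) : (["a", "b"] : List String).countP (fun s => decide (s < ss)) ≤ 2 := by
  have := List.countP_le_length (l := (["a", "b"] : List String)) (p := fun s => decide (s < ss))
  simpa using this

lemma pv_trail_le (es : String) : (["a", "b"] : List String).countP (fun s => decide (es < s)) ≤ 2 := by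
  have := List.countP_le_length (l := (["a", "b"] : List String)) (p := fun s => decide (es < s))
  simpa using this

lemma pv_kept_front (sn en : Int) (ss es : String) (hne : sn ≠ en) :
    pvKept sn en ss es sn
    = (pvRow sn).drop ((["a", "b"] : List String).countP (fun s => decide (s < ss))) := by
  by_cases h1 : ("a" : String) < ss <;> by_cases h2 : ("b" : String) < ss <;>
    [skip; skip; exact absurd (lt_trans pv_ab h2) h1; skip] <;>
    simp [pvKept, pvRow, hne, h1, h2, -String.lt_iff_toList_lt]

lemma pv_kept_back (sn en : Int) (ss es : String) (hne : en ≠ sn) :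
    pvKept sn en ss es en
    = (pvRow en).take (2 - (["a", "b"] : List String).countP (fun s => decide (es < s))) := by
  by_cases h3 : es < ("a" : String) <;> by_cases h4 : es < ("b" : String) <;>
    [skip; exact absurd (lt_trans h3 pv_ab) h4; skip; skip] <;>
    simp [pvKept, pvRow, hne, h3, h4, -String.lt_iff_toList_lt]

lemma pv_kept_single (sn : Int) (ss es : String) :
    pvKept sn sn ss es sn
    = ((pvRow sn).drop ((["a", "b"] : List String).countP (fun s => decide (s < ss)))).take
        (2 - (["a", "b"] : List String).countP (fun s => decide (es < s))
           - (["a", "b"] : List String).countP (fun s => decide (s < ss))) := by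
  by_cases h1 : ("a" : String) < ss <;> by_cases h2 : ("b" : String) < ss <;>
    by_cases h3 : es < ("a" : String) <;> by_cases h4 : es < ("b" : String) <;>
    first
      | exact absurd (lt_trans pv_ab h2) h1
      | exact absurd (lt_trans h3 pv_ab) h4
      | simp [pvKept, pvRow, h1, h2, h3, h4, -String.lt_iff_toList_lt]

lemma pv_flatMap_row_length (R : List Int) : (R.flatMap pvRow).length = 2 * R.length := by
  induction R with
  | nil => simp
  | cons z R ih => simp [pvRow, ih]; omega

-- ===== VERDICT (by name: the statement is the Claim_ definition above) =====
theorem expand_zone_range_py_spec : Claim_equal_expand_zone_range_py := by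
  intro sn ssub en esub _
  show expand_zone_range_py sn ssub en esub = expand_zone_range_py_alt sn ssub en esub
  unfold expand_zone_range_py expand_zone_range_py_alt
  by_cases hnone : ssub = none ∧ esub = none
  · obtain ⟨rfl, rfl⟩ := hnone
    simp
  · have hbool : (!(ssub.isSome || esub.isSome)) = false := by
      cases ssub <;> cases esub <;> simp_all
    rw [if_neg (by simp [hbool]), if_neg hnone]
    simp only []
    set ss := match ssub with | none => "a" | some s => if s = "" then "a" else s with hss
    set es := match esub with | none => "b" | some s => if s = "" then "b" else s with hes
    rw [pv_outer]
    have hrow : (fun z => (["a", "b"] : List String).map (fun s => PySem.Int.toStr z ++ s)) = pvRow := by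
      funext z; simp [pvRow]
    rw [hrow]
    set L := (["a", "b"] : List String).countP (fun s => decide (s < ss)) with hL
    set T := (["a", "b"] : List String).countP (fun s => decide (es < s)) with hT
    have hL2 : L ≤ 2 := pv_lead_le ss
    have hT2 : T ≤ 2 := pv_trail_le es
    simp only [List.nil_append]
    by_cases hord : sn ≤ en
    · by_cases heq : sn = en
      · -- single zone
        subst heq
        rw [PySem.List.pyRange_one_singleton]
        simp only [List.flatMap_cons, List.flatMap_nil, List.append_nil]
        have hflen : (pvRow sn).length = 2 := by simp [pvRow]
        rw [hflen]
        have hb : (((2 : Nat) : Int)) - (T : Int) = (((2 - T : Nat)) : Int) := by omega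
        rw [hb, PySem.List.slice_natCast]
        exact pv_kept_single sn ss es
      · -- at least two zones
        have hlt : sn < en := lt_of_le_of_ne hord heq
        rw [PySem.List.pyRange_one_succ_right (show sn ≤ en from hord),
            PySem.List.pyRange_one_cons (show sn < en from hlt)]
        set M := PySem.List.pyRange (sn + 1) en 1 with hM
        have hMmem : ∀ z ∈ M, z ≠ sn ∧ z ≠ en := by
          intro z hz
          have := (PySem.List.mem_pyRange_one).1 hz
          omega
        have hA : ((sn :: M) ++ [en]).flatMap (pvKept sn en ss es)
            = (pvRow sn).drop L ++ M.flatMap pvRow ++ (pvRow en).take (2 - T) := by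
          simp only [List.flatMap_append, List.flatMap_cons, List.flatMap_nil, List.append_nil]
          rw [pv_kept_front sn en ss es (by omega), pv_kept_back sn en ss es (by omega)]
          rw [pv_flatMap_congr M _ _ (fun z hz => pv_kept_mid sn en ss es z (hMmem z hz).1 (hMmem z hz).2)]
        rw [hA]
        have hfull : ((sn :: M) ++ [en]).flatMap pvRow
            = pvRow sn ++ M.flatMap pvRow ++ pvRow en := by
          simp [List.flatMap_append]
        rw [hfull]
        have hmidlen : (M.flatMap pvRow).length = 2 * M.length := pv_flatMap_row_length M
        have hflen : (pvRow sn ++ M.flatMap pvRow ++ pvRow en).length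
            = 2 * M.length + 4 := by
          simp [pvRow, hmidlen]
        rw [hflen]
        have hb : ((2 * M.length + 4 : Nat) : Int) - (T : Int)
            = ((2 * M.length + 4 - T : Nat) : Int) := by omega
        rw [hb, PySem.List.slice_natCast]
        have key : List.take (2 * M.length + 4 - T - L)
              (List.drop L ((pvRow sn ++ M.flatMap pvRow) ++ pvRow en))
            = (pvRow sn).drop L ++ M.flatMap pvRow ++ (pvRow en).take (2 - T) := by
          rw [List.append_assoc, List.drop_append_of_le_length (by simp [pvRow]; omega)]
          rw [List.take_append, List.take_of_length_le (by simp [pvRow]; omega)]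
          have hlen1 : ((pvRow sn).drop L).length = 2 - L := by simp [pvRow]
          rw [hlen1]
          have e2 : 2 * M.length + 4 - T - L - (2 - L) = 2 * M.length + (2 - T) := by omega
          rw [e2, List.take_append, hmidlen, List.take_of_length_le (by omega)]
          have e3 : 2 * M.length + (2 - T) - 2 * M.length = 2 - T := by omega
          rw [e3, List.append_assoc]
        rw [key]
    · -- empty range
      rw [PySem.List.pyRange_one_eq_nil (by omega)]
      simp only [List.flatMap_nil, List.length_nil]
      symm
      rw [List.eq_nil_iff_forall_not_mem]
      intro x hx
      have hx' : x ∈ ([] : List String) := PySem.List.mem_of_mem_slice _ _ _ hx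
      simp at hx'
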